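-- pv_equiv track=rewrite | github.com/XueDugu/TaintMini | alipay/taint_mini/taintmini.py | obtain_valid_page
-- ===== SOURCE A (Python) =====
-- def obtain_valid_page(files):
--     # 从文件列表中提取有效的页面名称
--     sub_pages = set()
--     for f in files:
--         sub_pages.add(str.split(f, ".")[0])
--     for f in list(sub_pages):
--         if f"{f}.js" not in files or f"{f}.axml" not in files:
--             sub_pages.remove(f)
--     return sub_pages
-- ===== SOURCE B (Python) =====
-- def obtain_valid_page(files):
--     # 从文件列表中提取有效的页面名称
--     # Single pass: group files by first segment into a dict of (has_js, has_axml)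
--     # flags, then keep the prefixes with both flags set; no membership scans of files.
--     flags = {}
--     for f in files:
--         p = f.split(".")[0]
--         js, ax = flags.get(p, (False, False))
--         flags[p] = (js or f == p + ".js", ax or f == p + ".axml")
--     return {p for p, (js, ax) in flags.items() if js and ax}
-- ===== Notes on version B (the rewrite author's own statement) =====
-- stated objective: faster
-- what changed: Replaces A's build-all-prefixes-then-prune loop (which rescans the files list twice per candidate) with a single grouping pass that folds the files into a dict mapping each first segment to (has_js, has_axml) flags and then keeps the keys with both flags set; no membership scan of files remains.
import Mathlib
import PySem

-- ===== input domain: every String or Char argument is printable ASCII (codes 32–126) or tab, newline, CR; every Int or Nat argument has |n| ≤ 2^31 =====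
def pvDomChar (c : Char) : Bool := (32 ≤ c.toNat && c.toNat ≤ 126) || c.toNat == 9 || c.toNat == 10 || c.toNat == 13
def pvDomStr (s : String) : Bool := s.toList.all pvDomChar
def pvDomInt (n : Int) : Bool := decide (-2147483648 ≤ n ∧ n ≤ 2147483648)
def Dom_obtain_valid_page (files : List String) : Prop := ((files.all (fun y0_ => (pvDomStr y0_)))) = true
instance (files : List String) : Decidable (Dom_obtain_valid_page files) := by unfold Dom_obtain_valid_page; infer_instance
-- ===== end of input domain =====

-- B replaces A's build-then-prune (with its list membership rescans) by one grouping pass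
-- into a dict of (has_js, has_axml) flags per first segment (faster in a timing run).

-- ===== PORT A =====
-- f.split(".")[0]: split? is some for sep "." and never returns an empty list, so [0] is the head
def pvFirstSeg (f : String) : String := ((PySem.Str.split? f ".").getD []).headD ""

def obtain_valid_page (files : List String) : List String :=
  let sub_pages : PySem.Set String :=
    files.foldl (fun s f => PySem.Set.add s (pvFirstSeg f)) PySem.Set.empty
  -- for f in list(sub_pages): remove f if a companion file is missing
  -- (set.remove never raises here: each f comes from the duplicate-free snapshot, removed at most once)
  sub_pages.foldl (fun s f =>
    if !(files.contains (f ++ ".js")) || !(files.contains (f ++ ".axml")) then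
      (PySem.Set.remove? s f).getD s
    else s) sub_pages

-- ===== PORT B =====
def obtain_valid_page_alt (files : List String) : List String :=
  let flags : PySem.Dict String (Bool × Bool) :=
    files.foldl (fun d f =>
      let p := pvFirstSeg f
      let v := d.getD p (false, false)
      d.insert p (v.1 || (f == p ++ ".js"), v.2 || (f == p ++ ".axml")))
      PySem.Dict.empty
  -- {p for p, (js, ax) in flags.items() if js and ax}: the keys are already distinct
  (flags.items.filter (fun kv => kv.2.1 && kv.2.2)).map Prod.fst

-- ===== PRECONDITION & SPEC =====
def Spec_obtain_valid_page (files : List String) (out : List String) : Prop := out = obtain_valid_page_alt files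
instance (files : List String) (out : List String) : Decidable (Spec_obtain_valid_page files out) := by unfold Spec_obtain_valid_page; infer_instance

-- ===== CLAIM (what is proved, stated in full; the proofs are below) =====
def Claim_equal_obtain_valid_page : Prop := ∀ (files : List String), Dom_obtain_valid_page files → Spec_obtain_valid_page files (obtain_valid_page files)

-- ===== LEMMAS AND PROOFS =====

-- the qualification test (proof-only helper)
def pvKeep (files : List String) (p : String) : Bool :=
  files.contains (p ++ ".js") && files.contains (p ++ ".axml")

-- the first piece produced by split-on-'.' is the longest dot-free prefix
lemma pv_go_head (fuel : Nat) : ∀ (l cur : List Char) (acc : List (List Char)), l.length < fuel →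
    ∃ t, PySem.Chars.splitOn.go ['.'] fuel l cur acc
      = acc.reverse ++ (cur.reverse ++ l.takeWhile (· != '.')) :: t := by
  induction fuel with
  | zero => intro l cur acc h; omega
  | succ fuel ih =>
    intro l cur acc h
    cases l with
    | nil => exact ⟨[], by simp [PySem.Chars.splitOn.go]⟩
    | cons c rest =>
      by_cases hc : c = '.'
      · subst hc
        have hpre : List.isPrefixOf ['.'] ('.' :: rest) = true := by
          simp [List.isPrefixOf]
        obtain ⟨t, ht⟩ := ih rest [] (cur.reverse :: acc) (by simp at h ⊢; omega)
        refine ⟨(rest.takeWhile (· != '.')) :: t, ?_⟩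
        simp only [PySem.Chars.splitOn.go, hpre, if_true]
        simp only [List.length_cons, List.length_nil, List.drop_succ_cons, List.drop_zero] at ht ⊢
        rw [ht]
        simp [List.takeWhile]
      · have hc' : (c != '.') = true := by simp [hc]
        have hpre : List.isPrefixOf ['.'] (c :: rest) = false := by
          simp [List.isPrefixOf]; exact fun e => hc e.symm
        obtain ⟨t, ht⟩ := ih rest (c :: cur) acc (by simp at h ⊢; omega)
        refine ⟨t, ?_⟩
        simp only [PySem.Chars.splitOn.go, hpre, Bool.false_eq_true, if_false]
        rw [ht]
        simp [List.takeWhile, hc']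

lemma pv_firstSeg_eq (f : String) :
    pvFirstSeg f = String.ofList (f.toList.takeWhile (· != '.')) := by
  obtain ⟨t, ht⟩ := pv_go_head (f.toList.length + 1) f.toList [] [] (by omega)
  simp only [pvFirstSeg, PySem.Str.split?, PySem.Chars.split?, PySem.Chars.splitOn]
  rw [show (".".toList) = ['.'] from rfl]
  simp only [List.isEmpty_iff, reduceCtorEq, if_false, Option.map_some, Option.getD_some]
  rw [ht]
  simp

-- no '.' occurs in a first segment
lemma pv_firstSeg_noDot (f : String) : '.' ∉ (pvFirstSeg f).toList := by
  rw [pv_firstSeg_eq]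
  intro hmem
  rw [String.toList_ofList] at hmem
  have := List.mem_takeWhile_imp hmem
  simp at this

-- first segment of p ++ ".js" / p ++ ".axml" for dot-free p
lemma pv_firstSeg_ext (p ext : String) (cs : List Char) (hp : '.' ∉ p.toList) (hx : ext.toList = '.' :: cs) :
    pvFirstSeg (p ++ ext) = p := by
  rw [pv_firstSeg_eq]
  have hl : (p ++ ext).toList = p.toList ++ ext.toList := by simp
  rw [hl, List.takeWhile_append]
  have h1 : p.toList.takeWhile (· != '.') = p.toList := by
    rw [List.takeWhile_eq_self_iff]
    intro a ha
    have : a ≠ '.' := fun e => hp (e ▸ ha)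
    simpa using this
  rw [h1, if_pos (by simp)]
  rw [hx]
  have h2 : List.takeWhile (fun x => x != '.') ('.' :: cs) = [] := by simp [List.takeWhile]
  rw [h2, List.append_nil]
  exact String.ofList_toList

-- value stored by B's grouping fold at a dot-free key p: the two companion-file flags
lemma pv_flags_getD (files : List String) (p : String) (hp : '.' ∉ p.toList) :
    ∀ d : PySem.Dict String (Bool × Bool),
    (files.foldl (fun d f =>
      let q := pvFirstSeg f
      let v := d.getD q (false, false)
      d.insert q (v.1 || (f == q ++ ".js"), v.2 || (f == q ++ ".axml"))) d).getD p (false, false)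
    = ((d.getD p (false, false)).1 || files.any (· == p ++ ".js"),
       (d.getD p (false, false)).2 || files.any (· == p ++ ".axml")) := by
  induction files with
  | nil => intro d; simp
  | cons f l ih =>
    intro d
    rw [List.foldl_cons, ih]
    by_cases hq : pvFirstSeg f = p
    · rw [hq, PySem.Dict.getD_insert_self]
      simp [Bool.or_assoc]
    · rw [PySem.Dict.getD_insert_of_ne _ _ _ (fun e => hq e.symm)]
      have hjs : (f == p ++ ".js") = false := by
        apply beq_false_of_ne
        intro e
        exact hq (by rw [e]; exact pv_firstSeg_ext p ".js" ['j','s'] hp rfl)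
      have hax : (f == p ++ ".axml") = false := by
        apply beq_false_of_ne
        intro e
        exact hq (by rw [e]; exact pv_firstSeg_ext p ".axml" ['a','x','m','l'] hp rfl)
      simp [hjs, hax]

-- set.remove(f) (total here, defaulted to the unchanged set when f is absent)
-- is exactly "drop the elements equal to f"
lemma pv_removeD (s : List String) (f : String) :
    (PySem.Set.remove? s f).getD s = s.filter (fun y => !(y == f)) := by
  simp only [PySem.Set.remove?, PySem.Set.discard, PySem.Set.contains]
  split_ifs with h
  · rfl
  · have h' : f ∉ s := by simpa [List.contains_eq_mem] using h
    show s = _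
    symm
    rw [List.filter_eq_self]
    intro y hy
    have hne : y ≠ f := fun e => h' (e ▸ hy)
    simp [hne]

-- A's pruning pass: folding the conditional removal over l filters by (x ∈ l → keep x)
lemma pv_fold_remove (files l : List String) : ∀ s : List String,
    l.foldl (fun s f =>
      if !(files.contains (f ++ ".js")) || !(files.contains (f ++ ".axml")) then
        (PySem.Set.remove? s f).getD s
      else s) s
    = s.filter (fun x => !(l.contains x) || pvKeep files x) := by
  induction l with
  | nil => intro s; simp
  | cons f l ih =>
    intro s
    rw [List.foldl_cons, ih]
    by_cases hk : pvKeep files f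
    · have hcond : ¬ ((!(files.contains (f ++ ".js")) || !(files.contains (f ++ ".axml"))) = true) := by
        simp only [pvKeep, Bool.and_eq_true] at hk
        have m1 : f ++ ".js" ∈ files := by simpa [List.contains_eq_mem] using hk.1
        have m2 : f ++ ".axml" ∈ files := by simpa [List.contains_eq_mem] using hk.2
        simp [m1, m2]
      rw [if_neg hcond]
      apply List.filter_congr
      intro x _
      by_cases hx : x = f
      · subst hx; simp [hk]
      · simp [hx]
    · have hk' : pvKeep files f = false := by simpa using hk
      have hcond : (!(files.contains (f ++ ".js")) || !(files.contains (f ++ ".axml"))) = true := by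
        simp only [pvKeep, Bool.and_eq_false_iff] at hk'
        rcases hk' with h | h
        · have m : f ++ ".js" ∉ files := by simpa [List.contains_eq_mem] using h
          simp [m]
        · have m : f ++ ".axml" ∉ files := by simpa [List.contains_eq_mem] using h
          simp [m]
      rw [if_pos hcond, pv_removeD, List.filter_filter]
      apply List.filter_congr
      intro x _
      by_cases hx : x = f
      · subst hx; simp [hk']
      · simp [hx]

-- ===== VERDICT (by name: the statement is the Claim_ definition above) =====
theorem obtain_valid_page_spec : Claim_equal_obtain_valid_page := by
  intro files _
  show obtain_valid_page files = obtain_valid_page_alt files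
  -- A reduces to filtering the ordered prefix set by pvKeep
  have hS0 : files.foldl (fun s f => PySem.Set.add s (pvFirstSeg f)) PySem.Set.empty
      = PySem.Set.ofList (files.map pvFirstSeg) := by
    simp [PySem.Set.ofList, List.foldl_map]
  have hA : obtain_valid_page files
      = (PySem.Set.ofList (files.map pvFirstSeg)).filter (pvKeep files) := by
    show (files.foldl (fun s f => PySem.Set.add s (pvFirstSeg f)) PySem.Set.empty).foldl
        (fun s f =>
          if !(files.contains (f ++ ".js")) || !(files.contains (f ++ ".axml")) then
            (PySem.Set.remove? s f).getD s
          else s)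
        (files.foldl (fun s f => PySem.Set.add s (pvFirstSeg f)) PySem.Set.empty)
        = _
    rw [hS0, pv_fold_remove files]
    apply List.filter_congr
    intro x hx
    have hc : List.contains (PySem.Set.ofList (files.map pvFirstSeg)) x = true := by
      rw [List.contains_eq_mem]; exact decide_eq_true hx
    rw [hc]; simp
  -- B: the dict's keys are the same ordered prefix set, its items carry the two flags
  set D := files.foldl (fun d f =>
        let p := pvFirstSeg f
        let v := d.getD p (false, false)
        d.insert p (v.1 || (f == p ++ ".js"), v.2 || (f == p ++ ".axml")))
        (PySem.Dict.empty : PySem.Dict String (Bool × Bool)) with hD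
  have hkeys : D.keys = PySem.Set.ofList (files.map pvFirstSeg) := by
    rw [hD, PySem.Dict.keys_foldl_insert_key]
    simp [PySem.Set.update_nil_left]
  have hnodup : D.keys.Nodup := by
    rw [hkeys]; exact PySem.Set.nodup_ofList _
  have hitems : D.items = D.keys.map (fun k => (k, D.getD k (false, false))) :=
    PySem.Dict.items_eq_map_keys D hnodup (false, false)
  have hB : obtain_valid_page_alt files
      = (D.items.filter (fun kv => kv.2.1 && kv.2.2)).map Prod.fst := rfl
  rw [hA, hB, hitems, hkeys, List.filter_map, List.map_map]
  have hcomp : (Prod.fst ∘ fun k : String => (k, D.getD k (false, false))) = id := rfl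
  rw [hcomp, List.map_id]
  apply List.filter_congr
  intro p hp
  have hpseg : ∃ f ∈ files, pvFirstSeg f = p := by
    have := (PySem.Set.mem_ofList (xs := files.map pvFirstSeg) (y := p)).mp hp
    simpa [List.mem_map, eq_comm] using this
  obtain ⟨f, _, hf⟩ := hpseg
  have hdot : '.' ∉ p.toList := hf ▸ pv_firstSeg_noDot f
  have hval := pv_flags_getD files p hdot PySem.Dict.empty
  simp only [Function.comp, hD] at hval ⊢
  rw [hval]
  have e1 : ∀ a : String, (files.any fun x => x == a) = files.contains a := by
    intro a
    rw [List.contains_eq_any_beq]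
    simp [BEq.comm]
  simp [pvKeep, PySem.Dict.getD_empty, e1, List.contains_eq_mem]
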